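-- pv_equiv track=rewrite | github.com/2jimoo/P_C_C_P | done/leetcode_2509.py | get_dist2
-- ===== SOURCE A (Python) =====
-- def get_dist2(n, queries):
--     res = []
--     # 같아지기 전까지 큰 쪽을 하나씩 올린다.
--     for x, y in queries:
--         res.append(1)
--         while x != y:
--             x, y = min(x, y), max(x, y) // 2
--             res[-1] += 1
--     return res
-- ===== SOURCE B (Python) =====
-- def get_dist2(n, queries):
--     res = []
--     for x, y in queries:
--         dx, dy = x.bit_length(), y.bit_length()
--         if dx < dy:
--             x, y, dx, dy = y, x, dy, dx
--         d = dx - dy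
--         res.append(d + 2 * ((x >> d) ^ y).bit_length() + 1)
--     return res
-- ===== Notes on version B (the rewrite author's own statement) =====
-- stated objective: faster
-- what changed: Replaces the per-query iterative halving loop (one climb per iteration) with closed-form bit arithmetic: align the deeper label by bit_length difference d, then the answer is d + 2*((x>>d)^y).bit_length() + 1.
-- outside the precondition, e.g. on get_dist2(0, [(-3, -3)]): A returns [1], B returns [1]
import Mathlib
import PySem

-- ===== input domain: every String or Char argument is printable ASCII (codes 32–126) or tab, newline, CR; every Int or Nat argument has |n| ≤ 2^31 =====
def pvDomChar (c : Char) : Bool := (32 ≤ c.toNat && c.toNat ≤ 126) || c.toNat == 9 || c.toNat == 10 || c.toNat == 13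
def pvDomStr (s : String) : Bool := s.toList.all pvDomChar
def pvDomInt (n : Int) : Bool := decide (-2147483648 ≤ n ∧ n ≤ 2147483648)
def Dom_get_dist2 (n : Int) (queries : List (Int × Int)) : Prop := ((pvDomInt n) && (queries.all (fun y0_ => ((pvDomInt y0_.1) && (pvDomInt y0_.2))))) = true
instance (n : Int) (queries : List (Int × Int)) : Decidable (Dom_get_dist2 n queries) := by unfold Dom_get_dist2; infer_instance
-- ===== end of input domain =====

-- B replaces A's per-query halving loop by closed-form bit-length arithmetic
-- (constant number of big-int operations per query instead of one iteration per climb).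

-- ===== PORT A =====
-- A's 'while x != y' loop, with fuel (x.toNat + y.toNat + 1 suffices on Pre_: the nonnegative
-- sum strictly decreases each iteration); the fuel only makes the same computation total.
def loopA (fuel : Nat) (x y acc : Int) : Int :=
  match fuel with
  | 0 => acc
  | f + 1 =>
    if x = y then acc
    else loopA f (min x y) (PySem.Int.floordiv (max x y) 2) (acc + 1)

def get_dist2 (n : Int) (queries : List (Int × Int)) : List Int :=
  queries.foldl (fun res q => res ++ [loopA (q.1.toNat + q.2.toNat + 1) q.1 q.2 1]) []

-- ===== PORT B =====
-- one query of Source B: dx,dy = bit lengths; swap so x is deeper; d = dx-dy;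
-- answer = d + 2*((x>>d)^y).bit_length() + 1
def altElem (q : Int × Int) : Int :=
  let dx := PySem.Int.bitLength q.1
  let dy := PySem.Int.bitLength q.2
  if dx < dy then
    let d := dy - dx
    (d : Int) + 2 * (PySem.Int.bitLength (PySem.Int.bxor (q.2 >>> d) q.1) : Int) + 1
  else
    let d := dx - dy
    (d : Int) + 2 * (PySem.Int.bitLength (PySem.Int.bxor (q.1 >>> d) q.2) : Int) + 1

def get_dist2_alt (n : Int) (queries : List (Int × Int)) : List Int :=
  queries.map altElem

-- ===== PRECONDITION & SPEC =====
-- Pre_ excludes queries containing a negative label: there A's halving loop diverges for every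
-- pair except equal ones (e.g. (0, -1) never terminates); labels of the LeetCode tree are ≥ 1.
def Pre_get_dist2 (n : Int) (queries : List (Int × Int)) : Prop :=
  ∀ q ∈ queries, 0 ≤ q.1 ∧ 0 ≤ q.2
instance (n : Int) (queries : List (Int × Int)) : Decidable (Pre_get_dist2 n queries) := by
  unfold Pre_get_dist2; infer_instance

def pvWitness_get_dist2 : Int × (List (Int × Int)) := (3, [(1, 2), (5, 5), (7, 10)])

def Spec_get_dist2 (n : Int) (queries : List (Int × Int)) (out : List Int) : Prop :=
  out = get_dist2_alt n queries
instance (n : Int) (queries : List (Int × Int)) (out : List Int) :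
    Decidable (Spec_get_dist2 n queries out) := by unfold Spec_get_dist2; infer_instance

-- ===== CLAIM (what is proved, stated in full; the proofs are below) =====
def Claim_equal_get_dist2 : Prop := ∀ (n : Int) (queries : List (Int × Int)),
  Dom_get_dist2 n queries → Pre_get_dist2 n queries →
  Spec_get_dist2 n queries (get_dist2 n queries)

-- ===== LEMMAS AND PROOFS =====

-- A's loop iteration count, on Nat
def cnt (fuel a b : Nat) : Nat :=
  match fuel with
  | 0 => 0
  | f + 1 => if a = b then 0 else cnt f (min a b) (max a b / 2) + 1

-- the closed form B computes, on Nat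
def gN (a b : Nat) : Nat :=
  let d := Nat.size (max a b) - Nat.size (min a b)
  d + 2 * Nat.size ((max a b >>> d) ^^^ min a b)

theorem size_half (n : Nat) (h : n ≠ 0) : Nat.size n = Nat.size (n / 2) + 1 := by
  conv_lhs => rw [← Nat.bit_decide_mod_two_eq_one_shiftRight_one n]
  rw [Nat.size_bit (by rwa [Nat.bit_decide_mod_two_eq_one_shiftRight_one])]
  simp [Nat.shiftRight_one]

theorem shiftRight_xor (a b k : Nat) : (a ^^^ b) >>> k = (a >>> k) ^^^ (b >>> k) := by
  apply Nat.eq_of_testBit_eq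
  intro i
  simp [Nat.testBit_shiftRight, Nat.testBit_xor]

theorem gN_self (a : Nat) : gN a a = 0 := by
  simp [gN]

-- the key recurrence: one iteration of A's loop preserves "remaining = closed form"
theorem gN_step (a b : Nat) (h : a < b) : gN a b = gN a (b / 2) + 1 := by
  have hb : b ≠ 0 := by omega
  have hsab : Nat.size a ≤ Nat.size b := Nat.size_le_size (Nat.le_of_lt h)
  have hsb : Nat.size b = Nat.size (b / 2) + 1 := size_half b hb
  have hmin : min a b = a := Nat.min_eq_left (Nat.le_of_lt h)
  have hmax : max a b = b := Nat.max_eq_right (Nat.le_of_lt h)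
  rcases Nat.lt_or_ge (Nat.size a) (Nat.size b) with hlt | hge
  · -- size a < size b : the deeper side stays b; d drops by one
    rcases Nat.lt_or_ge (b / 2) a with hgt | hge2
    · -- b/2 < a : forces size a = size b - 1, d = 1, new d' = 0
      have hs2 : Nat.size (b / 2) ≤ Nat.size a := Nat.size_le_size (Nat.le_of_lt hgt)
      have hsa : Nat.size a = Nat.size (b / 2) := by omega
      have hmin2 : min a (b / 2) = b / 2 := Nat.min_eq_right (Nat.le_of_lt hgt)
      have hmax2 : max a (b / 2) = a := Nat.max_eq_left (Nat.le_of_lt hgt)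
      have e1 : Nat.size b - Nat.size (b / 2) = 1 := by omega
      have e2 : Nat.size (b / 2) - Nat.size (b / 2) = 0 := by omega
      simp only [gN, hmin, hmax, hmin2, hmax2, hsa, e1, e2]
      rw [Nat.shiftRight_one, Nat.shiftRight_zero, Nat.xor_comm]
      omega
    · have hle : a ≤ b / 2 := hge2
      have hmin2 : min a (b / 2) = a := Nat.min_eq_left hle
      have hmax2 : max a (b / 2) = b / 2 := Nat.max_eq_right hle
      have hd : Nat.size b - Nat.size a = (Nat.size (b / 2) - Nat.size a) + 1 := by omega
      have hsh : b >>> (Nat.size b - Nat.size a)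
          = (b / 2) >>> (Nat.size (b / 2) - Nat.size a) := by
        rw [hd, Nat.add_comm, Nat.shiftRight_add, Nat.shiftRight_one]
      simp only [gN, hmin, hmax, hmin2, hmax2, hsh]
      omega
  · -- size a = size b : d = 0; after halving b, a becomes the deeper side with d' = 1
    have hsa : Nat.size a = Nat.size b := by omega
    have hgt : b / 2 < a := by
      by_contra hc
      have := Nat.size_le_size (Nat.le_of_not_lt hc)
      have ha0 : a ≠ 0 := by
        intro h0; rw [h0] at hsa
        simp [Nat.size_zero] at hsa
        have := Nat.size_eq_zero.mp hsa.symm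
        omega
      have : 0 < Nat.size a := Nat.size_pos.mpr (Nat.pos_of_ne_zero ha0)
      omega
    have hmin2 : min a (b / 2) = b / 2 := Nat.min_eq_right (Nat.le_of_lt hgt)
    have hmax2 : max a (b / 2) = a := Nat.max_eq_left (Nat.le_of_lt hgt)
    have hd0 : Nat.size b - Nat.size a = 0 := by omega
    have hd1 : Nat.size a - Nat.size (b / 2) = 1 := by omega
    have hxne : b ^^^ a ≠ 0 := by
      intro h0
      exact absurd (Nat.xor_eq_zero_iff.mp h0) (by omega)
    have hxsz : Nat.size (b ^^^ a) = Nat.size ((b ^^^ a) / 2) + 1 := size_half _ hxne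
    have hquot : (a >>> 1) ^^^ (b / 2) = (b ^^^ a) / 2 := by
      rw [← Nat.shiftRight_one b, ← shiftRight_xor, Nat.xor_comm a b, Nat.shiftRight_one]
    simp only [gN, hmin, hmax, hmin2, hmax2, hd0, hd1, Nat.shiftRight_zero, hquot]
    omega

theorem cnt_eq_gN (fuel a b : Nat) (h : a + b < fuel) : cnt fuel a b = gN a b := by
  induction fuel generalizing a b with
  | zero => omega
  | succ f ih =>
    rw [cnt]
    by_cases hab : a = b
    · simp [hab, gN_self]
    · simp only [hab, if_false]
      rcases Nat.lt_or_ge a b with hlt | hge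
      · have hmin : min a b = a := Nat.min_eq_left (Nat.le_of_lt hlt)
        have hmax : max a b = b := Nat.max_eq_right (Nat.le_of_lt hlt)
        rw [hmin, hmax, ih a (b / 2) (by omega), ← gN_step a b hlt]
      · have hlt : b < a := by omega
        have hmin : min a b = b := Nat.min_eq_right (Nat.le_of_lt hlt)
        have hmax : max a b = a := Nat.max_eq_left (Nat.le_of_lt hlt)
        have hsym : gN a b = gN b a := by simp [gN, Nat.min_comm, Nat.max_comm]
        rw [hmin, hmax, ih b (a / 2) (by omega), ← gN_step b a hlt, hsym]

-- bridge A: the Int fuelled loop on nonnegative inputs is acc + cnt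
theorem loopA_eq_cnt (fuel : Nat) (a b : Nat) (acc : Int) :
    loopA fuel (a : Int) (b : Int) acc = acc + (cnt fuel a b : Int) := by
  induction fuel generalizing a b acc with
  | zero => simp [loopA, cnt]
  | succ f ih =>
    rw [loopA, cnt]
    by_cases hab : a = b
    · simp [hab]
    · have hne : (a : Int) ≠ (b : Int) := by exact_mod_cast hab
      simp only [hne, if_false, hab]
      have hmin : min (a : Int) (b : Int) = ((min a b : Nat) : Int) := (Nat.cast_min a b).symm
      have hmax : max (a : Int) (b : Int) = ((max a b : Nat) : Int) := (Nat.cast_max a b).symm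
      have hdiv : PySem.Int.floordiv ((max a b : Nat) : Int) 2
          = ((max a b / 2 : Nat) : Int) := by
        exact_mod_cast PySem.Int.floordiv_natCast (max a b) 2
      rw [hmin, hmax, hdiv, ih]
      push_cast
      ring

-- PySem bit_length of a Nat cast is Nat.size
theorem bitLength_eq_size (m : Nat) : PySem.Int.bitLength (m : Int) = Nat.size m := by
  induction m using Nat.strong_induction_on with
  | _ m ih =>
    rcases Nat.eq_zero_or_pos m with h0 | hpos
    · subst h0; rfl
    · rw [PySem.Int.bitLength_natCast hpos, ih (m / 2) (Nat.div_lt_self hpos (by omega)),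
        size_half m (by omega)]

-- bridge B: one query of the B port on nonnegative inputs is the closed form + 1
theorem altElem_eq_gN (a b : Nat) : altElem ((a : Int), (b : Int)) = (gN a b : Int) + 1 := by
  have hxor : ∀ (u v : Nat), PySem.Int.bxor ((u : Nat) : Int) ((v : Nat) : Int)
      = ((u ^^^ v : Nat) : Int) := by intro u v; simp
  have hshift : ∀ (u : Nat) (k : Nat), ((u : Int) >>> k) = ((u >>> k : Nat) : Int) := by
    intro u k; exact (Int.natCast_shiftRight u k).symm
  simp only [altElem, bitLength_eq_size, hshift, hxor]
  rcases Nat.lt_or_ge (Nat.size a) (Nat.size b) with hlt | hge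
  · -- b is deeper, hence b is the max
    have hab : a < b := by
      by_contra hc
      exact absurd (Nat.size_le_size (Nat.le_of_not_lt hc)) (by omega)
    have hmin : min a b = a := Nat.min_eq_left (Nat.le_of_lt hab)
    have hmax : max a b = b := Nat.max_eq_right (Nat.le_of_lt hab)
    simp only [hlt, if_true, gN, hmin, hmax]
    push_cast
    ring
  · simp only [Nat.not_lt.mpr hge, if_false]
    rcases Nat.lt_or_ge (Nat.size b) (Nat.size a) with hlt' | hge'
    · -- a is strictly deeper, hence a is the max
      have hab : b < a := by
        by_contra hc
        exact absurd (Nat.size_le_size (Nat.le_of_not_lt hc)) (by omega)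
      have hmin : min a b = b := Nat.min_eq_right (Nat.le_of_lt hab)
      have hmax : max a b = a := Nat.max_eq_left (Nat.le_of_lt hab)
      simp only [gN, hmin, hmax]
      push_cast
      ring
    · -- equal depths: shift is by 0 on both sides, xor is symmetric
      have hs : Nat.size a = Nat.size b := by omega
      have hd : Nat.size a - Nat.size b = 0 := by omega
      have hgd : Nat.size (max a b) - Nat.size (min a b) = 0 := by
        rcases Nat.le_total a b with h | h
        · rw [Nat.min_eq_left h, Nat.max_eq_right h]; omega
        · rw [Nat.min_eq_right h, Nat.max_eq_left h]; omega
      have hgx : (max a b) ^^^ (min a b) = a ^^^ b := by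
        rcases Nat.le_total a b with h | h
        · rw [Nat.min_eq_left h, Nat.max_eq_right h, Nat.xor_comm]
        · rw [Nat.min_eq_right h, Nat.max_eq_left h]
      simp only [gN, hd, hgd, Nat.shiftRight_zero, hgx]
      push_cast
      ring

theorem foldl_append_map {α β : Type} (f : α → β) (l : List α) (acc : List β) :
    l.foldl (fun res q => res ++ [f q]) acc = acc ++ l.map f := by
  induction l generalizing acc with
  | nil => simp
  | cons x xs ih => simp [List.foldl_cons, ih]

-- ===== VERDICT (by name: the statement is the Claim_ definition above) =====
theorem get_dist2_spec : Claim_equal_get_dist2 := by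
  intro n queries _ hPre
  unfold Spec_get_dist2 get_dist2 get_dist2_alt
  rw [foldl_append_map (fun q => loopA (q.1.toNat + q.2.toNat + 1) q.1 q.2 1) queries []]
  rw [List.nil_append]
  apply List.map_congr_left
  intro q hq
  obtain ⟨hx, hy⟩ := hPre q hq
  obtain ⟨a, ha⟩ := Int.eq_ofNat_of_zero_le hx
  obtain ⟨b, hb⟩ := Int.eq_ofNat_of_zero_le hy
  have hq' : q = ((a : Int), (b : Int)) := by
    cases q; simp_all
  rw [hq']
  simp only [Int.toNat_natCast]
  rw [loopA_eq_cnt (a + b + 1) a b 1, cnt_eq_gN (a + b + 1) a b (by omega),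
    altElem_eq_gN a b]
  ring
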